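-- pv_equiv track=rewrite | github.com/ovidiu123/FIA-LABS | task3.py | is_valid_coloring
-- ===== SOURCE A (Python) =====
-- from typing import Dict, List, Optional, Set, Tuple
--
-- Node = int
--
-- Color = str
--
-- def is_valid_coloring(adj: Dict[Node, Set[Node]], assignment: Dict[Node, Color]) -> bool:
--     for u, nbs in adj.items():
--         if u not in assignment:
--             continue
--         for v in nbs:
--             if v in assignment and assignment[v] == assignment[u]:
--                 return False
--     return True
-- ===== SOURCE B (Python) =====
-- def is_valid_coloring(adj, assignment):
--     # Build a color-class index: color -> list of assigned nodes with that color,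
--     # then check each assigned node's neighbours against its own color class.
--     classes = {}
--     for u, c in assignment.items():
--         classes.setdefault(c, []).append(u)
--     for u, c in assignment.items():
--         cls = classes[c]
--         if any(v in cls for v in adj.get(u, ())):
--             return False
--     return True
-- ===== Notes on version B (the rewrite author's own statement) =====
-- stated objective: alternative
-- what changed: Instead of comparing assignment[v] == assignment[u] per edge while walking adj, B first builds a color->node-class index from assignment and then scans assignment, rejecting as soon as some assigned node has a neighbour inside its own color class.
import Mathlib
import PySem

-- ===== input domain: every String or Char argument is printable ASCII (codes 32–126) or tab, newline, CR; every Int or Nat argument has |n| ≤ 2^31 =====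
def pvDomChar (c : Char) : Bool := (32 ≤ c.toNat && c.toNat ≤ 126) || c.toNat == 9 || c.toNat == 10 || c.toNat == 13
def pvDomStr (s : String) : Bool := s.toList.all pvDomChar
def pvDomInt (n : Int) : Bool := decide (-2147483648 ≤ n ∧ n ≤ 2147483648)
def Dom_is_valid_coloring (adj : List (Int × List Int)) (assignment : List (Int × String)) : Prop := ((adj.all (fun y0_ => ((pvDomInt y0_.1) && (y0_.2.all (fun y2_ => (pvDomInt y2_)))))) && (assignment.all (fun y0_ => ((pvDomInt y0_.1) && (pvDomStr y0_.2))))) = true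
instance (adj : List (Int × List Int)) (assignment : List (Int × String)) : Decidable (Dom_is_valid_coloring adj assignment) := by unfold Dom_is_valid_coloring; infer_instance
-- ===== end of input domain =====

-- B replaces A's per-edge color comparison by a color->class index built from assignment
-- and a class-membership check on each assigned node's neighbours (objective: alternative).

-- ===== PORT A =====
-- inner 'for v in nbs: if v in assignment and assignment[v] == assignment[u]: return False'
def aInner (assignment : List (Int × String)) (u : Int) : List Int → Bool
  | [] => false
  | v :: vs =>
    if (PySem.Dict.mk assignment).contains v &&
       ((PySem.Dict.mk assignment).get? v == (PySem.Dict.mk assignment).get? u)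
    then true else aInner assignment u vs

-- outer 'for u, nbs in adj.items(): if u not in assignment: continue; …'
def aOuter (assignment : List (Int × String)) : List (Int × List Int) → Bool
  | [] => true
  | (u, nbs) :: rest =>
    if !(PySem.Dict.mk assignment).contains u then aOuter assignment rest
    else if aInner assignment u nbs then false
    else aOuter assignment rest

def is_valid_coloring (adj : List (Int × List Int)) (assignment : List (Int × String)) : Bool :=
  aOuter assignment adj

-- ===== PORT B =====
-- 'classes.setdefault(c, []).append(u)' over assignment.items()
def bClasses (assignment : List (Int × String)) : PySem.Dict String (List Int) :=
  assignment.foldl (fun d p => d.modify p.2 [] (· ++ [p.1])) PySem.Dict.empty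

-- 'for u, c in assignment.items(): if any(v in cls for v in adj.get(u, ())): return False'
def bLoop (adj : List (Int × List Int)) (classes : PySem.Dict String (List Int)) :
    List (Int × String) → Bool
  | [] => true
  | (u, c) :: rest =>
    let cls := classes.getD c []
    if ((PySem.Dict.mk adj).getD u []).any (fun v => cls.contains v) then false
    else bLoop adj classes rest

def is_valid_coloring_alt (adj : List (Int × List Int)) (assignment : List (Int × String)) : Bool :=
  bLoop adj (bClasses assignment) assignment

-- ===== PRECONDITION & SPEC =====
-- Pre_ : the arguments are dicts in Python, so their association lists have distinct keys;
-- lists with duplicate keys do not represent any Python input and are excluded.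
def Pre_is_valid_coloring (adj : List (Int × List Int)) (assignment : List (Int × String)) : Prop :=
  (adj.map Prod.fst).Nodup ∧ (assignment.map Prod.fst).Nodup
instance (adj : List (Int × List Int)) (assignment : List (Int × String)) : Decidable (Pre_is_valid_coloring adj assignment) := by unfold Pre_is_valid_coloring; infer_instance

def pvWitness_is_valid_coloring : (List (Int × List Int)) × (List (Int × String)) :=
  ([(0, [1]), (1, [0])], [(0, "a"), (1, "b")])

def Spec_is_valid_coloring (adj : List (Int × List Int)) (assignment : List (Int × String)) (out : Bool) : Prop := out = is_valid_coloring_alt adj assignment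
instance (adj : List (Int × List Int)) (assignment : List (Int × String)) (out : Bool) : Decidable (Spec_is_valid_coloring adj assignment out) := by unfold Spec_is_valid_coloring; infer_instance

-- ===== CLAIM (what is proved, stated in full; the proofs are below) =====
def Claim_equal_is_valid_coloring : Prop := ∀ (adj : List (Int × List Int)) (assignment : List (Int × String)), Dom_is_valid_coloring adj assignment → Pre_is_valid_coloring adj assignment → Spec_is_valid_coloring adj assignment (is_valid_coloring adj assignment)

-- ===== LEMMAS AND PROOFS =====

theorem aInner_true_iff (assignment : List (Int × String)) (u : Int) (nbs : List Int) :
    aInner assignment u nbs = true ↔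
      ∃ v ∈ nbs, (PySem.Dict.mk assignment).contains v = true ∧
        (PySem.Dict.mk assignment).get? v = (PySem.Dict.mk assignment).get? u := by
  induction nbs with
  | nil => simp [aInner]
  | cons v vs ih =>
    simp only [aInner]
    by_cases h : ((PySem.Dict.mk assignment).contains v &&
       ((PySem.Dict.mk assignment).get? v == (PySem.Dict.mk assignment).get? u)) = true
    · rw [if_pos h]
      simp only [Bool.and_eq_true, beq_iff_eq] at h
      simp only [true_iff, List.mem_cons]
      exact ⟨v, Or.inl rfl, h.1, h.2⟩
    · rw [if_neg h, ih]
      simp only [Bool.and_eq_true, beq_iff_eq] at h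
      constructor
      · rintro ⟨w, hw, hc, he⟩; exact ⟨w, List.mem_cons_of_mem _ hw, hc, he⟩
      · rintro ⟨w, hw, hc, he⟩
        rcases List.mem_cons.1 hw with rfl | hw
        · exact absurd ⟨hc, he⟩ h
        · exact ⟨w, hw, hc, he⟩

theorem aOuter_false_iff (assignment : List (Int × String)) (adj : List (Int × List Int)) :
    aOuter assignment adj = false ↔
      ∃ p ∈ adj, (PySem.Dict.mk assignment).contains p.1 = true ∧
        aInner assignment p.1 p.2 = true := by
  induction adj with
  | nil => simp [aOuter]
  | cons p rest ih =>
    obtain ⟨u, nbs⟩ := p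
    simp only [aOuter]
    by_cases hc : (PySem.Dict.mk assignment).contains u = true
    · rw [if_neg (by simp [hc])]
      by_cases hi : aInner assignment u nbs = true
      · rw [if_pos hi]
        exact iff_of_true rfl ⟨(u, nbs), List.mem_cons_self, hc, hi⟩
      · rw [if_neg hi, ih]
        constructor
        · rintro ⟨q, hq, h1, h2⟩; exact ⟨q, List.mem_cons_of_mem _ hq, h1, h2⟩
        · rintro ⟨q, hq, h1, h2⟩
          rcases List.mem_cons.1 hq with rfl | hq
          · exact absurd h2 hi
          · exact ⟨q, hq, h1, h2⟩
    · simp only [Bool.not_eq_true] at hc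
      simp only [hc, Bool.not_false, if_true]
      rw [ih]
      constructor
      · rintro ⟨q, hq, h1, h2⟩; exact ⟨q, List.mem_cons_of_mem _ hq, h1, h2⟩
      · rintro ⟨q, hq, h1, h2⟩
        rcases List.mem_cons.1 hq with rfl | hq
        · rw [hc] at h1; exact absurd h1 (by simp)
        · exact ⟨q, hq, h1, h2⟩

theorem bLoop_false_iff (adj : List (Int × List Int)) (classes : PySem.Dict String (List Int))
    (l : List (Int × String)) :
    bLoop adj classes l = false ↔
      ∃ q ∈ l, ∃ v ∈ (PySem.Dict.mk adj).getD q.1 [], v ∈ classes.getD q.2 [] := by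
  induction l with
  | nil => simp [bLoop]
  | cons q rest ih =>
    obtain ⟨u, c⟩ := q
    simp only [bLoop]
    by_cases h : ((PySem.Dict.mk adj).getD u []).any
        (fun v => (classes.getD c []).contains v) = true
    · rw [if_pos h]
      rw [List.any_eq_true] at h
      obtain ⟨v, hv, hvc⟩ := h
      exact iff_of_true rfl ⟨(u, c), List.mem_cons_self, v, hv, by simpa using hvc⟩
    · rw [if_neg h, ih]
      constructor
      · rintro ⟨q, hq, hv⟩; exact ⟨q, List.mem_cons_of_mem _ hq, hv⟩
      · rintro ⟨q, hq, v, hv, hvc⟩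
        rcases List.mem_cons.1 hq with rfl | hq
        · exact absurd (List.any_eq_true.2 ⟨v, hv, by simpa using hvc⟩) h
        · exact ⟨q, hq, v, hv, hvc⟩

theorem mem_classes_foldl (l : List (Int × String)) (d : PySem.Dict String (List Int))
    (v : Int) (c : String) :
    v ∈ (l.foldl (fun d p => d.modify p.2 [] (· ++ [p.1])) d).getD c [] ↔
      v ∈ d.getD c [] ∨ (v, c) ∈ l := by
  induction l generalizing d with
  | nil => simp
  | cons p rest ih =>
    obtain ⟨u, k⟩ := p
    simp only [List.foldl_cons]
    rw [ih]
    rw [PySem.Dict.getD_modify]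
    by_cases hck : c = k
    · subst hck
      simp [List.mem_append]
      tauto
    · simp only [if_neg hck, List.mem_cons, Prod.mk.injEq]
      constructor
      · rintro (h | h)
        · exact Or.inl h
        · exact Or.inr (Or.inr h)
      · rintro (h | ⟨⟨rfl, rfl⟩, rfl⟩ | h)
        · exact Or.inl h
        · exact absurd rfl hck
        · exact Or.inr h

theorem mem_classes (assignment : List (Int × String)) (v : Int) (c : String) :
    v ∈ (bClasses assignment).getD c [] ↔ (v, c) ∈ assignment := by
  unfold bClasses
  rw [mem_classes_foldl]
  simp [PySem.Dict.getD_empty]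

-- membership in a key-Nodup association list ↔ first-match lookup
theorem mem_iff_get? {ν : Type} [BEq ν] [LawfulBEq ν] (l : List (Int × ν))
    (hn : (l.map Prod.fst).Nodup) (k : Int) (v : ν) :
    (k, v) ∈ l ↔ (PySem.Dict.mk l).get? k = some v := by
  constructor
  · intro h
    exact PySem.Dict.get?_of_mem_items (d := PySem.Dict.mk l) h (by simpa [PySem.Dict.keys] using hn)
  · intro h
    exact PySem.Dict.mem_items_of_get?_eq_some _ h

theorem is_valid_coloring_spec' (adj : List (Int × List Int)) (assignment : List (Int × String))
    (hpre : Pre_is_valid_coloring adj assignment) :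
    is_valid_coloring adj assignment = is_valid_coloring_alt adj assignment := by
  obtain ⟨hadj, hasg⟩ := hpre
  have key : (is_valid_coloring adj assignment = false) ↔
      (is_valid_coloring_alt adj assignment = false) := by
    unfold is_valid_coloring is_valid_coloring_alt
    rw [aOuter_false_iff, bLoop_false_iff]
    constructor
    · rintro ⟨⟨u, nbs⟩, hmem, hcont, hinner⟩
      rw [aInner_true_iff] at hinner
      obtain ⟨v, hv, hvcont, hveq⟩ := hinner
      rw [PySem.Dict.contains_eq_isSome_get?] at hcont
      obtain ⟨cu, hcu⟩ := Option.isSome_iff_exists.1 hcont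
      have hnbs : (PySem.Dict.mk adj).get? u = some nbs :=
        (mem_iff_get? adj hadj u nbs).1 hmem
      refine ⟨(u, cu), (mem_iff_get? assignment hasg u cu).2 hcu, v, ?_, ?_⟩
      · rw [PySem.Dict.getD_eq_get?_getD, hnbs]
        exact hv
      · rw [mem_classes]
        exact (mem_iff_get? assignment hasg v cu).2 (by rw [hveq, hcu])
    · rintro ⟨⟨u, c⟩, hmem, v, hv, hvc⟩
      rw [mem_classes] at hvc
      have hu : (PySem.Dict.mk assignment).get? u = some c :=
        (mem_iff_get? assignment hasg u c).1 hmem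
      have hvg : (PySem.Dict.mk assignment).get? v = some c :=
        (mem_iff_get? assignment hasg v c).1 hvc
      -- v ∈ getD adj u [] forces get? u = some nbs for some nbs
      rcases hnbs : (PySem.Dict.mk adj).get? u with _ | nbs
      · rw [PySem.Dict.getD_eq_get?_getD, hnbs] at hv; simp at hv
      · have hgd : (PySem.Dict.mk adj).getD u [] = nbs := by
          rw [PySem.Dict.getD_eq_get?_getD, hnbs]; rfl
        refine ⟨(u, nbs), (mem_iff_get? adj hadj u nbs).2 hnbs, ?_, ?_⟩
        · rw [PySem.Dict.contains_eq_isSome_get?, hu]; rfl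
        · rw [aInner_true_iff]
          refine ⟨v, hgd ▸ hv, ?_, by rw [hu, hvg]⟩
          rw [PySem.Dict.contains_eq_isSome_get?, hvg]; rfl
  cases hA : is_valid_coloring adj assignment <;>
    cases hB : is_valid_coloring_alt adj assignment <;> simp_all

-- ===== VERDICT (by name: the statement is the Claim_ definition above) =====
theorem is_valid_coloring_spec : Claim_equal_is_valid_coloring := by
  intro adj assignment _ hpre
  exact is_valid_coloring_spec' adj assignment hpre
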